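-- pv_equiv track=rewrite | github.com/hebelmx/Veriqan | Prisma/scripts/run_type_scanner_post_hook.py | diff_package_versions
-- ===== SOURCE A (Python) =====
-- from typing import Iterable, List, Sequence, Set
--
-- def diff_package_versions(old: dict[str, str], new: dict[str, str]) -> Set[str]:
--     changed: Set[str] = set()
--     for pkg_id, version in new.items():
--         if old.get(pkg_id) != version:
--             changed.add(pkg_id)
--     for pkg_id in old.keys() - new.keys():
--         changed.add(pkg_id)
--     return changed
-- ===== SOURCE B (Python) =====
-- def diff_package_versions(old: dict[str, str], new: dict[str, str]) -> set[str]: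
--     # Subtractive strategy: start from full copies of both dicts and DELETE the
--     # unchanged intersection in one pass over old; what survives in the new-copy
--     # is the added/changed keys, what survives in the old-copy is the removed keys.
--     added_or_changed = dict(new)
--     removed = dict(old)
--     for pkg_id, version in old.items():
--         if pkg_id in new:
--             del removed[pkg_id]
--             if new[pkg_id] == version:
--                 del added_or_changed[pkg_id]
--     return set(added_or_changed) | set(removed)
-- ===== Notes on version B (the rewrite author's own statement) =====
-- stated objective: alternative
-- what changed: A selects changed keys by scanning new with old.get plus a key-set difference; B works subtractively: it copies both dicts, makes one pass over old deleting each unchanged intersection entry from the new-copy and every shared key from the old-copy, and returns the union of the two surviving key sets.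
import Mathlib
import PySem

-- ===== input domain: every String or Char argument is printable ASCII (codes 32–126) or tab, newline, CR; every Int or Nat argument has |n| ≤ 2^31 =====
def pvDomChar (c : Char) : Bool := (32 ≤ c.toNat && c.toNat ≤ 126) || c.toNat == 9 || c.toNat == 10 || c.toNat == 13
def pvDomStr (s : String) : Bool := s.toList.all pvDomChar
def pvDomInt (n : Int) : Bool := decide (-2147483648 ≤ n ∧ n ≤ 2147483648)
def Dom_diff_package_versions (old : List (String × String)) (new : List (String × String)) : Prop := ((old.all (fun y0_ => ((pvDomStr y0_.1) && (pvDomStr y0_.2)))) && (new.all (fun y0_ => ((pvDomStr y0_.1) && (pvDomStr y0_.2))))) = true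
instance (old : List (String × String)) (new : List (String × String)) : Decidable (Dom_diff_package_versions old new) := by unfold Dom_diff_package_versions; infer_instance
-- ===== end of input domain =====

-- B replaces A's select-the-changed-keys scan (over new, plus a key-set difference) by a
-- subtractive one-pass algorithm: delete every unchanged intersection entry from copies of
-- both dicts and return the union of the surviving key sets; objective: alternative (same cost).
-- Both Pythons return a set; the ports return it as a PySem.Set (distinct elements).

-- ===== PORT A =====
def diff_package_versions (old : List (String × String)) (new : List (String × String)) : List String :=
  let dOld := PySem.Dict.ofList old
  let dNew := PySem.Dict.ofList new
  let changed : PySem.Set String :=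
    dNew.items.foldl (fun s p => if dOld.get? p.1 ≠ some p.2 then PySem.Set.add s p.1 else s)
      PySem.Set.empty
  (PySem.Set.diff dOld.keys dNew.keys).foldl (fun s k => PySem.Set.add s k) changed

-- ===== PORT B =====
def diff_package_versions_alt (old : List (String × String)) (new : List (String × String)) : List String :=
  let dOld := PySem.Dict.ofList old
  let dNew := PySem.Dict.ofList new
  -- for pkg_id, version in old.items(): if pkg_id in new: del removed[pkg_id]; if new[pkg_id]==version: del added_or_changed[pkg_id]
  let final := dOld.items.foldl
    (fun (st : PySem.Dict String String × PySem.Dict String String) kv =>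
      if dNew.contains kv.1 then
        ((if dNew.get? kv.1 = some kv.2 then st.1.erase kv.1 else st.1), st.2.erase kv.1)
      else st)
    (dNew, dOld)
  PySem.Set.union (PySem.Set.ofList final.1.keys) (PySem.Set.ofList final.2.keys)

-- ===== PRECONDITION & SPEC =====
def Spec_diff_package_versions (old : List (String × String)) (new : List (String × String)) (out : List String) : Prop := out = diff_package_versions_alt old new
instance (old : List (String × String)) (new : List (String × String)) (out : List String) : Decidable (Spec_diff_package_versions old new out) := by unfold Spec_diff_package_versions; infer_instance

-- ===== CLAIM (what is proved, stated in full; the proofs are below) =====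
def Claim_equal_diff_package_versions : Prop := ∀ (old : List (String × String)) (new : List (String × String)), Dom_diff_package_versions old new → Spec_diff_package_versions old new (diff_package_versions old new)

-- ===== LEMMAS AND PROOFS =====

-- A's first loop: with distinct keys the conditional Set.add appends the kept keys in order.
theorem foldl_add_if_of_nodup_keys (P : String × String → Prop) [DecidablePred P]
    (l : List (String × String)) (s : PySem.Set String)
    (hnd : (l.map (·.1)).Nodup) (hdisj : ∀ p ∈ l, p.1 ∉ s) :
    l.foldl (fun s p => if P p then PySem.Set.add s p.1 else s) s
      = s ++ (l.filter (fun p => decide (P p))).map (·.1) := by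
  induction l generalizing s with
  | nil => simp
  | cons p t ih =>
    simp only [List.map_cons, List.nodup_cons] at hnd
    by_cases hP : P p
    · simp only [List.foldl_cons, if_pos hP, List.filter_cons, decide_eq_true hP]
      rw [PySem.Set.add_of_not_mem (hdisj p (by simp))]
      rw [ih (s ++ [p.1]) hnd.2 (by
        intro q hq
        simp only [List.mem_append, List.mem_singleton]
        rintro (h | h)
        · exact hdisj q (List.mem_cons_of_mem _ hq) h
        · exact hnd.1 (h ▸ List.mem_map_of_mem hq))]
      simp
    · simp only [List.foldl_cons, if_neg hP, List.filter_cons, decide_eq_false hP]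
      exact ih s hnd.2 (fun q hq => hdisj q (List.mem_cons_of_mem _ hq))

-- B's loop over the pair of dict copies splits into two independent conditional-erase loops.
theorem bfold_split (dNew : PySem.Dict String String) (l : List (String × String))
    (a r : PySem.Dict String String) :
    l.foldl (fun (st : PySem.Dict String String × PySem.Dict String String) kv =>
        if dNew.contains kv.1 then
          ((if dNew.get? kv.1 = some kv.2 then st.1.erase kv.1 else st.1), st.2.erase kv.1)
        else st) (a, r)
      = (l.foldl (fun d kv => if dNew.contains kv.1 ∧ dNew.get? kv.1 = some kv.2 then d.erase kv.1 else d) a,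
         l.foldl (fun d kv => if dNew.contains kv.1 then d.erase kv.1 else d) r) := by
  induction l generalizing a r with
  | nil => rfl
  | cons kv t ih =>
    simp only [List.foldl_cons]
    by_cases hc : dNew.contains kv.1
    · by_cases he : dNew.get? kv.1 = some kv.2
      · rw [if_pos hc, if_pos hc, if_pos he, if_pos (And.intro hc he)]; exact ih _ _
      · rw [if_pos hc, if_pos hc, if_neg he,
            if_neg (fun h : dNew.contains kv.1 = true ∧ dNew.get? kv.1 = some kv.2 => he h.2)]
        exact ih _ _
    · rw [if_neg hc, if_neg hc,
          if_neg (fun h : dNew.contains kv.1 = true ∧ dNew.get? kv.1 = some kv.2 => hc h.1)]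
      exact ih _ _

-- A fold of conditional erases is one filter of the items.
theorem foldl_erase_items (P : String × String → Prop) [DecidablePred P]
    (l : List (String × String)) (d : PySem.Dict String String) :
    (l.foldl (fun d kv => if P kv then d.erase kv.1 else d) d).items
      = d.items.filter (fun q => !(l.any (fun kv => decide (P kv) && (kv.1 == q.1)))) := by
  induction l generalizing d with
  | nil => simp
  | cons kv t ih =>
    simp only [List.foldl_cons, List.any_cons]
    by_cases hP : P kv
    · rw [if_pos hP, ih]
      show ((d.items.filter (fun p => !(p.1 == kv.1))).filter _) = _
      rw [List.filter_filter]
      refine List.filter_congr ?_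
      intro q _
      simp only [decide_eq_true hP, Bool.true_and, Bool.not_or]
      rw [Bool.and_comm, BEq.comm]
    · rw [if_neg hP, ih]
      refine List.filter_congr ?_
      intro q _
      simp [decide_eq_false hP]

theorem mem_keys_of_mem_filter_map_fst (d : PySem.Dict String String)
    (f : String × String → Bool) (x : String)
    (hx : x ∈ (d.items.filter f).map (·.1)) : x ∈ d.keys := by
  rcases List.mem_map.mp hx with ⟨q, hq, rfl⟩
  exact List.mem_map_of_mem (List.mem_of_mem_filter hq)

theorem diff_package_versions_spec : Claim_equal_diff_package_versions := by
  intro old new _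
  unfold Spec_diff_package_versions diff_package_versions diff_package_versions_alt
  dsimp only
  set dOld := PySem.Dict.ofList old with hdo
  set dNew := PySem.Dict.ofList new with hdn
  have hndO : dOld.keys.Nodup := PySem.Dict.nodup_keys_ofList old
  have hndN : dNew.keys.Nodup := PySem.Dict.nodup_keys_ofList new
  -- ===== A's value: changed-new keys ++ removed keys =====
  rw [foldl_add_if_of_nodup_keys (P := fun p => dOld.get? p.1 ≠ some p.2) dNew.items
        PySem.Set.empty hndN (by intro p _ h; exact (List.not_mem_nil h).elim)]
  have hCsub : ∀ x ∈ (PySem.Set.empty ++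
      (dNew.items.filter (fun p => decide (dOld.get? p.1 ≠ some p.2))).map (·.1)), x ∈ dNew.keys := by
    intro x hx
    exact mem_keys_of_mem_filter_map_fst dNew _ x ((List.nil_append _) ▸ hx)
  have hfoldA : ∀ (C : PySem.Set String) (L : List String),
      L.foldl (fun s k => PySem.Set.add s k) C = PySem.Set.update C L := fun _ _ => rfl
  rw [hfoldA,
      PySem.Set.update_eq_append_of_disjoint _ _
        (PySem.Set.nodup_diff _ _ hndO)
        (by
          intro x hxd hxC
          exact ((PySem.Set.mem_diff _ _ _).mp hxd).2 (hCsub x hxC))]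
  -- ===== B's value: surviving new keys ++ surviving old keys =====
  rw [bfold_split]
  dsimp only
  simp only [PySem.Dict.keys]
  rw [foldl_erase_items (P := fun kv => dNew.contains kv.1 ∧ dNew.get? kv.1 = some kv.2) dOld.items dNew,
      foldl_erase_items (P := fun kv => dNew.contains kv.1 = true) dOld.items dOld]
  have haocnd : ((dNew.items.filter (fun q =>
      !(dOld.items.any (fun kv => decide (dNew.contains kv.1 ∧ dNew.get? kv.1 = some kv.2) && (kv.1 == q.1))))).map (·.1)).Nodup :=
    hndN.sublist (List.filter_sublist.map _)
  have hremnd : ((dOld.items.filter (fun q =>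
      !(dOld.items.any (fun kv => decide (dNew.contains kv.1 = true) && (kv.1 == q.1))))).map (·.1)).Nodup :=
    hndO.sublist (List.filter_sublist.map _)
  rw [PySem.Set.ofList_eq_self_of_nodup _ haocnd, PySem.Set.ofList_eq_self_of_nodup _ hremnd]
  have hunion : ∀ (s : PySem.Set String) (t : PySem.Set String),
      PySem.Set.union s t = PySem.Set.update s t := fun _ _ => rfl
  rw [hunion,
      PySem.Set.update_eq_append_of_disjoint _ _ hremnd
        (by
          intro x hx hxa
          rcases List.mem_map.mp hx with ⟨q, hq, rfl⟩
          have hcon : dNew.contains q.1 = true :=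
            (PySem.Dict.contains_iff_mem_keys _ _).mpr (mem_keys_of_mem_filter_map_fst dNew _ q.1 hxa)
          have hany : dOld.items.any (fun kv => decide (dNew.contains kv.1 = true) && (kv.1 == q.1)) = true :=
            List.any_eq_true.mpr ⟨q, (List.mem_filter.mp hq).1, by simp [hcon]⟩
          have hcond := (List.mem_filter.mp hq).2
          rw [hany] at hcond
          simp at hcond)]
  -- ===== the two appended blocks coincide =====
  have hse : (PySem.Set.empty : List String) = [] := rfl
  rw [hse, List.nil_append]
  refine congrArg₂ (· ++ ·) ?_ ?_
  · -- changed/added block: pointwise equality of the two filters over new.items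
    refine congrArg _ (List.filter_congr ?_)
    intro q hq
    have hq2 : dNew.get? q.1 = some q.2 := PySem.Dict.get?_of_mem_items dNew (by exact hq) hndN
    have hany : (dOld.items.any (fun kv =>
        decide (dNew.contains kv.1 ∧ dNew.get? kv.1 = some kv.2) && (kv.1 == q.1)))
        = decide (dOld.get? q.1 = some q.2) := by
      rw [Bool.eq_iff_iff]
      simp only [List.any_eq_true, Bool.and_eq_true, decide_eq_true_eq, beq_iff_eq]
      constructor
      · rintro ⟨kv, hkv, ⟨hc, he⟩, hk1⟩
        rw [hk1] at he
        have hv : kv.2 = q.2 := Option.some.inj (he.symm.trans hq2)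
        have hm : (q.1, q.2) ∈ dOld.items := by
          have hkveq : kv = (q.1, q.2) := Prod.ext hk1 hv
          exact hkveq ▸ hkv
        exact PySem.Dict.get?_of_mem_items dOld hm hndO
      · intro h
        refine ⟨(q.1, q.2), PySem.Dict.mem_items_of_get?_eq_some dOld h, ⟨?_, hq2⟩, rfl⟩
        rw [PySem.Dict.contains_eq_isSome_get?, hq2]
        rfl
    rw [hany, ← decide_not]
  · -- removed block
    have hdiff : PySem.Set.diff (dOld.items.map (·.1)) (dNew.items.map (·.1))
        = (dOld.items.map (·.1)).filter (fun x => !((dNew.items.map (·.1)).contains x)) := rfl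
    rw [hdiff, List.filter_map]
    refine congrArg _ (List.filter_congr ?_)
    intro q hq
    have hany : (dOld.items.any (fun kv => decide (dNew.contains kv.1 = true) && (kv.1 == q.1)))
        = (dNew.items.map (·.1)).contains q.1 := by
      rw [Bool.eq_iff_iff]
      simp only [List.any_eq_true, Bool.and_eq_true, decide_eq_true_eq, beq_iff_eq,
        List.contains_iff_mem]
      constructor
      · rintro ⟨kv, hkv, hc, hk1⟩
        exact hk1 ▸ ((PySem.Dict.contains_iff_mem_keys _ _).mp hc)
      · intro h
        exact ⟨q, hq, (PySem.Dict.contains_iff_mem_keys _ _).mpr h, rfl⟩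
    simp only [Function.comp]
    rw [hany]
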